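-- pv_equiv track=rewrite | github.com/uw-it-aca/spotseeker_server | views/search.py | get_days_in_range
-- ===== SOURCE A (Python) =====
-- def get_days_in_range(start_day, until_day):
--     day_lookup = ["su", "m", "t", "w", "th", "f",
--                   "sa", "su", "m", "t", "w", "th", "f", "sa"]
--     matched_days = []
--     add_days = False
--
--     for day in day_lookup:
--         if day == start_day:
--             add_days = True
--         if add_days:
--             matched_days.append(day)
--
--         if day == until_day and add_days is True:
--             return matched_days
--
--     return []
-- ===== SOURCE B (Python) =====
-- def get_days_in_range(start_day, until_day):
--     weekdays = ["su", "m", "t", "w", "th", "f", "sa"]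
--     if start_day not in weekdays or until_day not in weekdays:
--         return []
--     i = weekdays.index(start_day)
--     u = weekdays.index(until_day)
--     n = (u - i) % 7
--     return [weekdays[(i + k) % 7] for k in range(n + 1)]
-- ===== Notes on version B (the rewrite author's own statement) =====
-- stated objective: simpler
-- what changed: Replaces the doubled 14-entry list with a flag-scan and early return by a closed-form modular index computation: n = (u - i) % 7 and an inclusive wraparound comprehension over range(n+1).
import Mathlib
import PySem

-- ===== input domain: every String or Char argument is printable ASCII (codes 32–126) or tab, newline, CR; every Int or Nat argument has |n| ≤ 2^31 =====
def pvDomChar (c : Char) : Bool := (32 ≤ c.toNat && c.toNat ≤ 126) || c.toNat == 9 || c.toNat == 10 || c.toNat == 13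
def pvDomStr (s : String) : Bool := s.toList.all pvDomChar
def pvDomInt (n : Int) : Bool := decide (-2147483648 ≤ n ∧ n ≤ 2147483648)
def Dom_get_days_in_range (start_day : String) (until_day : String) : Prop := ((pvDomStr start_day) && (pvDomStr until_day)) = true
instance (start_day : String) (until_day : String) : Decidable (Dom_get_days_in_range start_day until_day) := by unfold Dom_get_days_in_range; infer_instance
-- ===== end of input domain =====

-- B replaces A's flag-scan over a doubled 14-entry list by a closed-form modular
-- index computation (simpler); both are total and proved equal on all strings.

-- ===== PORT A =====
-- the for-loop with early return, as structural recursion over day_lookup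
def pvGoA (l : List String) (start_day until_day : String)
    (matched_days : List String) (add_days : Bool) : List String :=
  match l with
  | [] => []
  | day :: rest =>
    let add_days := if day == start_day then true else add_days
    let matched_days := if add_days then matched_days ++ [day] else matched_days
    if day == until_day && add_days then matched_days
    else pvGoA rest start_day until_day matched_days add_days

def get_days_in_range (start_day : String) (until_day : String) : List String :=
  pvGoA ["su", "m", "t", "w", "th", "f", "sa", "su", "m", "t", "w", "th", "f", "sa"]
    start_day until_day [] false

-- ===== PORT B =====
def pvWeekdays : List String := ["su", "m", "t", "w", "th", "f", "sa"]

def get_days_in_range_alt (start_day : String) (until_day : String) : List String :=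
  if !(pvWeekdays.contains start_day) || !(pvWeekdays.contains until_day) then []
  else
    let i : Int := ((PySem.List.index? pvWeekdays start_day).getD 0 : Nat)
    let u : Int := ((PySem.List.index? pvWeekdays until_day).getD 0 : Nat)
    let n : Int := PySem.Int.mod (u - i) 7
    (PySem.List.pyRange 0 (n + 1) 1).map
      (fun k => (PySem.List.pyGet? pvWeekdays (PySem.Int.mod (i + k) 7)).getD "")

-- ===== PRECONDITION & SPEC =====
def Spec_get_days_in_range (start_day : String) (until_day : String) (out : List String) : Prop := out = get_days_in_range_alt start_day until_day
instance (start_day : String) (until_day : String) (out : List String) : Decidable (Spec_get_days_in_range start_day until_day out) := by unfold Spec_get_days_in_range; infer_instance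

-- ===== CLAIM (what is proved, stated in full; the proofs are below) =====
def Claim_equal_get_days_in_range : Prop := ∀ (start_day : String) (until_day : String), Dom_get_days_in_range start_day until_day → Spec_get_days_in_range start_day until_day (get_days_in_range start_day until_day)

-- ===== LEMMAS AND PROOFS =====

-- if until_day never occurs in the scanned list, the loop falls through and returns []
theorem pvGoA_of_not_mem_u (l : List String) (s u : String) (acc : List String) (add : Bool)
    (h : u ∉ l) : pvGoA l s u acc add = [] := by
  induction l generalizing acc add with
  | nil => rfl
  | cons d rest ih =>
    simp only [List.mem_cons, not_or] at h
    have hdu : (d == u) = false := beq_eq_false_iff_ne.mpr (fun e => h.1 e.symm)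
    simp only [pvGoA, hdu, Bool.false_and]
    exact ih _ _ h.2

-- if start_day never occurs, add_days stays false and the loop returns []
theorem pvGoA_of_not_mem_s (l : List String) (s u : String) (acc : List String)
    (h : s ∉ l) : pvGoA l s u acc false = [] := by
  induction l generalizing acc with
  | nil => rfl
  | cons d rest ih =>
    simp only [List.mem_cons, not_or] at h
    have hds : (d == s) = false := beq_eq_false_iff_ne.mpr (fun e => h.1 e.symm)
    simp only [pvGoA, hds, Bool.false_eq_true, if_false, Bool.and_false]
    exact ih _ h.2

theorem pv_main (s u : String) : get_days_in_range s u = get_days_in_range_alt s u := by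
  by_cases hs : s ∈ pvWeekdays <;> by_cases hu : u ∈ pvWeekdays
  · fin_cases hs <;> fin_cases hu <;> decide
  · have hB : get_days_in_range_alt s u = [] := by
      simp [get_days_in_range_alt, hu]
    have hA : get_days_in_range s u = [] := by
      apply pvGoA_of_not_mem_u
      simp only [pvWeekdays, List.mem_cons, List.not_mem_nil] at hu ⊢
      tauto
    rw [hA, hB]
  · have hB : get_days_in_range_alt s u = [] := by
      simp [get_days_in_range_alt, hs]
    have hA : get_days_in_range s u = [] := by
      apply pvGoA_of_not_mem_s
      simp only [pvWeekdays, List.mem_cons, List.not_mem_nil] at hs ⊢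
      tauto
    rw [hA, hB]
  · have hB : get_days_in_range_alt s u = [] := by
      simp [get_days_in_range_alt, hu]
    have hA : get_days_in_range s u = [] := by
      apply pvGoA_of_not_mem_u
      simp only [pvWeekdays, List.mem_cons, List.not_mem_nil] at hu ⊢
      tauto
    rw [hA, hB]

-- ===== VERDICT (by name: the statement is the Claim_ definition above) =====
theorem get_days_in_range_spec : Claim_equal_get_days_in_range := by
  intro s u _
  exact pv_main s u
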